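-- pv_equiv track=rewrite | github.com/alonShevach/introduction-to-CS | ex4/hangman.py | check_valid_letter
-- ===== SOURCE A (Python) =====
-- CHAR_A = 97
--
-- LETTERS_COUNT = 26
--
-- def check_valid_letter(user_input):
--     """checking if a letter is following the requirements, being a single lower english letter"""
--     if (len(user_input) != 1) and (type(user_input) != str):
--         return False
--     for i in range(LETTERS_COUNT):
--         any_letter = index_to_letter(i)
--         if any_letter == user_input:
--             return True
--     return False
--
-- def index_to_letter(index):
--     """return the letter corresponding to the given index"""
--     return chr(index + CHAR_A)
-- ===== SOURCE B (Python) =====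
-- def check_valid_letter(user_input):
--     """checking if a letter is following the requirements, being a single lower english letter"""
--     if len(user_input) != 1:
--         return False
--     return isinstance(user_input, str) and 97 <= ord(user_input) <= 122
-- ===== Notes on version B (the rewrite author's own statement) =====
-- stated objective: simpler
-- what changed: Replaces the 26-iteration generate-each-letter-and-compare scan with a length check plus a direct O(1) code-point range test 97 <= ord(c) <= 122.
import Mathlib
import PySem

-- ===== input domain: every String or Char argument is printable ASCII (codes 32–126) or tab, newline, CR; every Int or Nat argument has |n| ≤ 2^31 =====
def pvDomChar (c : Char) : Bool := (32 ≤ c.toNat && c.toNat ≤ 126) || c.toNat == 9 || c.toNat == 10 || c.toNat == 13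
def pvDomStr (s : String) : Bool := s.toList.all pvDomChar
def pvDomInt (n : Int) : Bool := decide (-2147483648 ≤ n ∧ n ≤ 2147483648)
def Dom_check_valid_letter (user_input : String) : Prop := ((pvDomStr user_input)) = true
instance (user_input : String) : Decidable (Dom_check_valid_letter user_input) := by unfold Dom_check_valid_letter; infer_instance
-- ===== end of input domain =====

-- B replaces A's 26-iteration letter-by-letter scan with a length check plus a direct code-point range test (simpler).

-- ===== PORT A =====
def CHAR_A : Int := 97

def LETTERS_COUNT : Int := 26

def index_to_letter (index : Int) : String :=
  String.ofList [Char.ofNat (index + CHAR_A).toNat]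

-- the `type(user_input) != str` conjunct of A's guard is always false for a String argument
def check_valid_letter (user_input : String) : Bool :=
  if (PySem.Str.len user_input != 1) && false then
    false
  else
    (PySem.List.pyRange 0 LETTERS_COUNT 1).any (fun i =>
      index_to_letter i == user_input)

-- ===== PORT B =====
def check_valid_letter_alt (user_input : String) : Bool :=
  if PySem.Str.len user_input != 1 then
    false
  else
    match user_input.toList with
    | [c] => decide (97 ≤ c.toNat ∧ c.toNat ≤ 122)
    | _ => false

-- ===== PRECONDITION & SPEC =====
def Spec_check_valid_letter (user_input : String) (out : Bool) : Prop := out = check_valid_letter_alt user_input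
instance (user_input : String) (out : Bool) : Decidable (Spec_check_valid_letter user_input out) := by unfold Spec_check_valid_letter; infer_instance

-- ===== CLAIM (what is proved, stated in full; the proofs are below) =====
def Claim_equal_check_valid_letter : Prop := ∀ (user_input : String), Dom_check_valid_letter user_input → Spec_check_valid_letter user_input (check_valid_letter user_input)

-- ===== LEMMAS AND PROOFS =====

theorem pv_range26 : PySem.List.pyRange 0 LETTERS_COUNT 1 =
    [0,1,2,3,4,5,6,7,8,9,10,11,12,13,14,15,16,17,18,19,20,21,22,23,24,25] := by
  decide

theorem pv_single (c : Char) :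
    check_valid_letter (String.ofList [c]) = check_valid_letter_alt (String.ofList [c]) := by
  unfold check_valid_letter check_valid_letter_alt
  rw [pv_range26, Bool.eq_iff_iff]
  simp only [List.any_cons, List.any_nil, index_to_letter, PySem.Str.len_eq,
    String.toList_ofList, List.length_cons, List.length_nil, CHAR_A]
  norm_num [String.ofList_inj]
  constructor
  · rintro (rfl | rfl | rfl | rfl | rfl | rfl | rfl | rfl | rfl | rfl | rfl | rfl | rfl |
      rfl | rfl | rfl | rfl | rfl | rfl | rfl | rfl | rfl | rfl | rfl | rfl | rfl) <;> decide
  · rintro ⟨h1, h2⟩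
    rw [show c = Char.ofNat c.toNat from (Char.ofNat_toNat c).symm]
    generalize c.toNat = n at h1 h2 ⊢
    interval_cases n <;> decide

theorem check_valid_letter_spec : Claim_equal_check_valid_letter := by
  intro s _
  unfold Spec_check_valid_letter
  rw [show s = String.ofList s.toList by simp]
  rcases s.toList with _ | ⟨c, _ | ⟨c2, rest⟩⟩
  · decide
  · exact pv_single c
  · unfold check_valid_letter check_valid_letter_alt
    rw [pv_range26]
    simp [index_to_letter, String.ofList_inj]
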